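-- pv_equiv track=rewrite | github.com/EndogenAI/rag | scripts/link_source_stubs.py | read_referenced_by
-- ===== SOURCE A (Python) =====
-- REFERENCED_BY_HEADING = "## Referenced By"
--
-- def read_referenced_by(stub_content: str) -> tuple[str, list[str], str]:
--     """
--     Split stub content into three parts: before_section, existing_links, after_section.
--     Returns (before, links_list, after).
--     'before' includes everything up to and including the ## Referenced By heading line.
--     'after' is everything from the next ## heading onward (or empty).
--     """
--     lines = stub_content.splitlines(keepends=True)
--     heading_idx: int | None = None
--     next_heading_idx: int | None = None
--
--     for i, line in enumerate(lines):
--         stripped = line.strip()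
--         if stripped == REFERENCED_BY_HEADING and heading_idx is None:
--             heading_idx = i
--         elif heading_idx is not None and stripped.startswith("## ") and i > heading_idx:
--             next_heading_idx = i
--             break
--
--     if heading_idx is None:
--         # No ## Referenced By section — entire file is 'before', nothing after
--         return stub_content, [], ""
--
--     before = "".join(lines[: heading_idx + 1])
--     section_lines = lines[heading_idx + 1 : next_heading_idx]
--     after = "".join(lines[next_heading_idx:]) if next_heading_idx else ""
--
--     # Extract existing link lines (strip sentinel comment and blank lines)
--     links: list[str] = []
--     for line in section_lines:
--         stripped = line.strip()
--         if stripped.startswith("- [") or stripped.startswith("-["):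
--             links.append(stripped)
--
--     return before, links, after
-- ===== SOURCE B (Python) =====
-- REFERENCED_BY_HEADING = "## Referenced By"
--
-- def read_referenced_by(stub_content: str) -> tuple[str, list[str], str]:
--     """Single forward pass with an explicit state machine (before / in_section / after)
--     instead of finding indices and slicing."""
--     before: list[str] = []
--     links: list[str] = []
--     after: list[str] = []
--     state = 0  # 0 = before, 1 = in section, 2 = after
--     for line in stub_content.splitlines(keepends=True):
--         if state == 0:
--             before.append(line)
--             if line.strip() == REFERENCED_BY_HEADING:
--                 state = 1
--         elif state == 1:
--             stripped = line.strip()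
--             if stripped.startswith("## "):
--                 state = 2
--                 after.append(line)
--             elif stripped.startswith("- [") or stripped.startswith("-["):
--                 links.append(stripped)
--         else:
--             after.append(line)
--     if state == 0:
--         return stub_content, [], ""
--     return "".join(before), links, "".join(after)
-- ===== Notes on version B (the rewrite author's own statement) =====
-- stated objective: alternative
-- what changed: Replaces A's two-phase find-indices-then-slice-and-rejoin approach with a single forward pass over the kept-ends lines driven by an explicit before/in-section/after state machine that accumulates the three outputs directly.
import Mathlib
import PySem

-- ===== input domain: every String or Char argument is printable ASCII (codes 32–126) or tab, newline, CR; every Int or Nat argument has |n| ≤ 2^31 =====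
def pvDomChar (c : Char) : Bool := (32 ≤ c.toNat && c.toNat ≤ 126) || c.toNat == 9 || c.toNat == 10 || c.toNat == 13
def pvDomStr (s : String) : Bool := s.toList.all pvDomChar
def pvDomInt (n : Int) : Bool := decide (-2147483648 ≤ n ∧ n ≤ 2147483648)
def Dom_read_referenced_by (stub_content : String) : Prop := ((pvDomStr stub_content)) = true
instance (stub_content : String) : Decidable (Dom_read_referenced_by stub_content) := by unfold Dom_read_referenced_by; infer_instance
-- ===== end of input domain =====

-- B replaces A's index-finding + slicing with a single state-machine pass (alternative decomposition, same cost).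

-- shared helper: str.splitlines(keepends=True), hand-ported (PySem.Str.splitlines drops the ends).
-- Exact on Dom: for printable-ASCII + tab/NL/CR text the line breaks are exactly '\n', '\r' and '\r\n'
-- (Python's extra break characters \v \f \x1c-\x1e \x85 \u2028 \u2029 lie outside Dom).
def pvSplitKeep : List Char → List (List Char)
  | [] => []
  | '\r' :: '\n' :: rest => ['\r', '\n'] :: pvSplitKeep rest
  | c :: rest =>
    if c = '\n' ∨ c = '\r' then [c] :: pvSplitKeep rest
    else
      match pvSplitKeep rest with
      | [] => [[c]]
      | l :: ls => (c :: l) :: ls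

def pvHeading : List Char := "## Referenced By".toList
def pvHH : List Char := "## ".toList
def pvL1 : List Char := "- [".toList
def pvL2 : List Char := "-[".toList

-- ===== PORT A =====
-- the 'for i, line in enumerate(lines)' search with break; state = (heading_idx, next_heading_idx)
def pvLoopA : List (List Char) → Nat → Option Nat → Option Nat × Option Nat
  | [], _, h => (h, none)
  | line :: rest, i, h =>
    let stripped := PySem.Chars.strip line
    match h with
    | none =>
      if stripped = pvHeading then pvLoopA rest (i + 1) (some i)
      else pvLoopA rest (i + 1) none
    | some j =>
      if PySem.Chars.startswith stripped pvHH = true ∧ j < i then (some j, some i)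
      else pvLoopA rest (i + 1) (some j)

def read_referenced_by (stub_content : String) : String × List String × String :=
  let lines := pvSplitKeep stub_content.toList
  match pvLoopA lines 0 none with
  | (none, _) => (stub_content, [], "")
  | (some heading_idx, next_heading_idx) =>
    let before := String.ofList (PySem.List.slice lines none (some ((heading_idx : Int) + 1))).flatten
    let section_lines := PySem.List.slice lines (some ((heading_idx : Int) + 1))
      (match next_heading_idx with | some k => some (k : Int) | none => none)
    -- 'if next_heading_idx' : Python truthiness (None and 0 are falsy)
    let after := match next_heading_idx with
      | some k => if k ≠ 0 then String.ofList (PySem.List.slice lines (some (k : Int)) none).flatten else ""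
      | none => ""
    let links := section_lines.foldl (fun acc line =>
      if PySem.Chars.startswith (PySem.Chars.strip line) pvL1 = true ∨
         PySem.Chars.startswith (PySem.Chars.strip line) pvL2 = true
      then acc ++ [String.ofList (PySem.Chars.strip line)] else acc) []
    (before, links, after)

-- ===== PORT B =====
-- one step of the state machine; state.1 : 0 = before, 1 = in section, 2 = after
def pvStepB (st : Nat × List (List Char) × List String × List (List Char)) (line : List Char) :
    Nat × List (List Char) × List String × List (List Char) :=
  let (state, before, links, after) := st
  if state = 0 then
    let before := before ++ [line]
    if PySem.Chars.strip line = pvHeading then (1, before, links, after)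
    else (0, before, links, after)
  else if state = 1 then
    if PySem.Chars.startswith (PySem.Chars.strip line) pvHH = true then
      (2, before, links, after ++ [line])
    else if PySem.Chars.startswith (PySem.Chars.strip line) pvL1 = true ∨
            PySem.Chars.startswith (PySem.Chars.strip line) pvL2 = true then
      (1, before, links ++ [String.ofList (PySem.Chars.strip line)], after)
    else (1, before, links, after)
  else (state, before, links, after ++ [line])

def read_referenced_by_alt (stub_content : String) : String × List String × String :=
  let r := (pvSplitKeep stub_content.toList).foldl pvStepB (0, [], [], [])
  if r.1 = 0 then (stub_content, [], "")
  else (String.ofList r.2.1.flatten, r.2.2.1, String.ofList r.2.2.2.flatten)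

-- ===== PRECONDITION & SPEC =====
def Spec_read_referenced_by (stub_content : String) (out : String × List String × String) : Prop := out = read_referenced_by_alt stub_content
instance (stub_content : String) (out : String × List String × String) : Decidable (Spec_read_referenced_by stub_content out) := by unfold Spec_read_referenced_by; infer_instance

-- ===== CLAIM (what is proved, stated in full; the proofs are below) =====
def Claim_equal_read_referenced_by : Prop := ∀ (stub_content : String), Dom_read_referenced_by stub_content → Spec_read_referenced_by stub_content (read_referenced_by stub_content)

-- ===== LEMMAS AND PROOFS =====

-- Every list splits at its first element satisfying P (or has none).
theorem pv_split_first {α : Type} (P : α → Prop) [DecidablePred P] (ls : List α) :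
    (∀ l ∈ ls, ¬ P l) ∨ ∃ pre x rest, ls = pre ++ x :: rest ∧ (∀ l ∈ pre, ¬ P l) ∧ P x := by
  induction ls with
  | nil => exact Or.inl (by simp)
  | cons a ls ih =>
    by_cases ha : P a
    · exact Or.inr ⟨[], a, ls, by simp, by simp, ha⟩
    · rcases ih with h | ⟨pre, x, rest, rfl, hpre, hx⟩
      · exact Or.inl (by simpa [ha] using h)
      · exact Or.inr ⟨a :: pre, x, rest, by simp, by simpa [ha] using hpre, hx⟩

theorem pvLoopA_none (ls : List (List Char)) (i : Nat)
    (h : ∀ l ∈ ls, ¬ PySem.Chars.strip l = pvHeading) :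
    pvLoopA ls i none = (none, none) := by
  induction ls generalizing i with
  | nil => rfl
  | cons a ls ih =>
    simp only [pvLoopA]
    rw [if_neg (h a (by simp))]
    exact ih (i + 1) (fun l hl => h l (by simp [hl]))

theorem pvLoopA_found (pre : List (List Char)) (h : List Char) (rest : List (List Char)) (i : Nat)
    (hpre : ∀ l ∈ pre, ¬ PySem.Chars.strip l = pvHeading)
    (hh : PySem.Chars.strip h = pvHeading) :
    pvLoopA (pre ++ h :: rest) i none = pvLoopA rest (i + pre.length + 1) (some (i + pre.length)) := by
  induction pre generalizing i with
  | nil => simp [pvLoopA, hh]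
  | cons a pre ih =>
    rw [List.cons_append]
    simp only [pvLoopA]
    rw [if_neg (hpre a (by simp))]
    rw [ih (i + 1) (fun l hl => hpre l (by simp [hl]))]
    rw [show i + 1 + pre.length = i + (a :: pre).length from by simp only [List.length_cons]; omega]

theorem pvLoopA_no_next (ls : List (List Char)) (i j : Nat) (hj : j < i)
    (h : ∀ l ∈ ls, ¬ PySem.Chars.startswith (PySem.Chars.strip l) pvHH = true) :
    pvLoopA ls i (some j) = (some j, none) := by
  induction ls generalizing i with
  | nil => rfl
  | cons a ls ih =>
    simp only [pvLoopA]
    rw [if_neg (fun hc => h a (by simp) hc.1)]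
    exact ih (i + 1) (by omega) (fun l hl => h l (by simp [hl]))

theorem pvLoopA_next (mid : List (List Char)) (g : List Char) (tail : List (List Char)) (i j : Nat)
    (hj : j < i)
    (hmid : ∀ l ∈ mid, ¬ PySem.Chars.startswith (PySem.Chars.strip l) pvHH = true)
    (hg : PySem.Chars.startswith (PySem.Chars.strip g) pvHH = true) :
    pvLoopA (mid ++ g :: tail) i (some j) = (some j, some (i + mid.length)) := by
  induction mid generalizing i with
  | nil =>
    rw [List.nil_append]
    simp only [pvLoopA]
    rw [if_pos ⟨hg, hj⟩]
    simp
  | cons a mid ih =>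
    rw [List.cons_append]
    simp only [pvLoopA]
    rw [if_neg (fun hc => hmid a (by simp) hc.1)]
    rw [ih (i + 1) (by omega) (fun l hl => hmid l (by simp [hl]))]
    rw [show i + 1 + mid.length = i + (a :: mid).length from by simp only [List.length_cons]; omega]

theorem pvStepB_state0 (ls : List (List Char)) (b : List (List Char)) (lk : List String)
    (a : List (List Char)) (h : ∀ l ∈ ls, ¬ PySem.Chars.strip l = pvHeading) :
    ls.foldl pvStepB (0, b, lk, a) = (0, b ++ ls, lk, a) := by
  induction ls generalizing b with
  | nil => simp
  | cons x ls ih =>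
    have hstep : pvStepB (0, b, lk, a) x = (0, b ++ [x], lk, a) := by
      simp [pvStepB, h x (by simp)]
    rw [List.foldl_cons, hstep, ih (b ++ [x]) (fun l hl => h l (by simp [hl]))]
    simp

theorem pvStepB_state1 (ls : List (List Char)) (b : List (List Char)) (lk : List String)
    (a : List (List Char))
    (h : ∀ l ∈ ls, ¬ PySem.Chars.startswith (PySem.Chars.strip l) pvHH = true) :
    ls.foldl pvStepB (1, b, lk, a) =
      (1, b, ls.foldl (fun acc line =>
        if PySem.Chars.startswith (PySem.Chars.strip line) pvL1 = true ∨
           PySem.Chars.startswith (PySem.Chars.strip line) pvL2 = true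
        then acc ++ [String.ofList (PySem.Chars.strip line)] else acc) lk, a) := by
  induction ls generalizing lk with
  | nil => rfl
  | cons x ls ih =>
    by_cases hx : PySem.Chars.startswith (PySem.Chars.strip x) pvL1 = true ∨
        PySem.Chars.startswith (PySem.Chars.strip x) pvL2 = true
    · rw [List.foldl_cons,
        show pvStepB (1, b, lk, a) x = (1, b, lk ++ [String.ofList (PySem.Chars.strip x)], a) from by
          rcases hx with hx1 | hx1 <;> simp [pvStepB, h x (by simp), hx1],
        ih _ (fun l hl => h l (by simp [hl])), List.foldl_cons]
      simp [hx]
    · rw [List.foldl_cons,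
        show pvStepB (1, b, lk, a) x = (1, b, lk, a) from by
          have hn1 : ¬ PySem.Chars.startswith (PySem.Chars.strip x) pvL1 = true :=
            fun hc => hx (Or.inl hc)
          have hn2 : ¬ PySem.Chars.startswith (PySem.Chars.strip x) pvL2 = true :=
            fun hc => hx (Or.inr hc)
          simp [pvStepB, h x (by simp), hn1, hn2],
        ih _ (fun l hl => h l (by simp [hl])), List.foldl_cons]
      simp [hx]

theorem pvStepB_state2 (ls : List (List Char)) (b : List (List Char)) (lk : List String)
    (a : List (List Char)) :
    ls.foldl pvStepB (2, b, lk, a) = (2, b, lk, a ++ ls) := by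
  induction ls generalizing a with
  | nil => simp
  | cons x ls ih =>
    have hstep : pvStepB (2, b, lk, a) x = (2, b, lk, a ++ [x]) := by
      simp [pvStepB]
    rw [List.foldl_cons, hstep, ih (a ++ [x])]
    simp

theorem pv_main (s : String) : read_referenced_by s = read_referenced_by_alt s := by
  rcases pv_split_first (fun l => PySem.Chars.strip l = pvHeading) (pvSplitKeep s.toList)
    with hno | ⟨pre, h, rest, hls, hpre, hh⟩
  · simp only [read_referenced_by, read_referenced_by_alt,
      pvLoopA_none _ 0 hno, pvStepB_state0 _ _ _ _ hno]
    simp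
  · have hfold : (pvSplitKeep s.toList).foldl pvStepB
        (0, ([] : List (List Char)), ([] : List String), ([] : List (List Char)))
        = rest.foldl pvStepB (1, pre ++ [h], [], []) := by
      rw [hls, List.foldl_append, pvStepB_state0 pre _ _ _ hpre, List.foldl_cons]
      have : pvStepB (0, [] ++ pre, [], []) h = (1, pre ++ [h], [], []) := by
        simp [pvStepB, hh]
      rw [this]
    have hBefore : (pvSplitKeep s.toList).take (pre.length + 1) = pre ++ [h] := by
      rw [hls, show pre ++ h :: rest = (pre ++ [h]) ++ rest from by simp]
      exact List.take_left' (by simp)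
    have hDrop : (pvSplitKeep s.toList).drop (pre.length + 1) = rest := by
      rw [hls, show pre ++ h :: rest = (pre ++ [h]) ++ rest from by simp]
      exact List.drop_left' (by simp)
    rcases pv_split_first
        (fun l => PySem.Chars.startswith (PySem.Chars.strip l) pvHH = true) rest
      with hno2 | ⟨mid, g, tail, hrest, hmid, hg⟩
    · simp only [read_referenced_by, read_referenced_by_alt]
      rw [hls, pvLoopA_found pre h rest 0 hpre hh,
        pvLoopA_no_next rest (0 + pre.length + 1) (0 + pre.length) (by omega) hno2, ← hls]
      simp only [hfold, pvStepB_state1 rest _ _ _ hno2]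
      rw [show ((((0 + pre.length : Nat) : Int)) + 1) = (((pre.length + 1 : Nat)) : Int) from by
        push_cast; ring]
      rw [PySem.List.slice_to_natCast, PySem.List.slice_from_natCast, hBefore, hDrop]
      simp
    · simp only [read_referenced_by, read_referenced_by_alt]
      rw [hls, pvLoopA_found pre h rest 0 hpre hh, hrest,
        pvLoopA_next mid g tail (0 + pre.length + 1) (0 + pre.length) (by omega) hmid hg,
        ← hrest, ← hls]
      simp only [hfold, hrest, List.foldl_append, pvStepB_state1 mid _ _ _ hmid]
      have hstepg : pvStepB (1, pre ++ [h],
          (mid.foldl (fun acc line =>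
            if PySem.Chars.startswith (PySem.Chars.strip line) pvL1 = true ∨
               PySem.Chars.startswith (PySem.Chars.strip line) pvL2 = true
            then acc ++ [String.ofList (PySem.Chars.strip line)] else acc) []), []) g
          = (2, pre ++ [h],
             (mid.foldl (fun acc line =>
               if PySem.Chars.startswith (PySem.Chars.strip line) pvL1 = true ∨
                  PySem.Chars.startswith (PySem.Chars.strip line) pvL2 = true
               then acc ++ [String.ofList (PySem.Chars.strip line)] else acc) []),
             [] ++ [g]) := by
        simp [pvStepB, hg]
      rw [List.foldl_cons, hstepg, pvStepB_state2]
      rw [show ((((0 + pre.length : Nat) : Int)) + 1) = (((pre.length + 1 : Nat)) : Int) from by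
        push_cast; ring]
      rw [PySem.List.slice_to_natCast, PySem.List.slice_natCast, PySem.List.slice_from_natCast,
        hBefore, hDrop, hrest]
      have hsec : (mid ++ g :: tail).take (0 + pre.length + 1 + mid.length - (pre.length + 1))
          = mid := by
        rw [show 0 + pre.length + 1 + mid.length - (pre.length + 1) = mid.length from by omega]
        exact List.take_left' rfl
      have haft : (pvSplitKeep s.toList).drop (0 + pre.length + 1 + mid.length) = g :: tail := by
        rw [hls, hrest,
          show pre ++ h :: (mid ++ g :: tail) = ((pre ++ [h]) ++ mid) ++ g :: tail from by simp]
        exact List.drop_left' (by simp; omega)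
      rw [hsec]
      rw [hls, hrest] at haft ⊢
      rw [haft]
      rw [if_pos (by omega : 0 + pre.length + 1 + mid.length ≠ 0)]
      simp

-- ===== VERDICT (by name: the statement is the Claim_ definition above) =====
theorem read_referenced_by_spec : Claim_equal_read_referenced_by := by
  intro s _
  unfold Spec_read_referenced_by
  exact pv_main s
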